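-- pv_equiv track=rewrite | github.com/Billybar/py-exam | course_notebook/mmn14/mmn14.py | is_list_palindrome
-- ===== SOURCE A (Python) =====
-- FIRST_INDEX = 0
--
-- def is_list_palindrome(lst,left_index = FIRST_INDEX , right_index = None):
--     # Initialize right index on first call only
--     if right_index is None:
--         right_index = len(lst) -1
--
--     # if left ptr > right ptr -> True
--     if left_index > right_index:
--         return True
--
--     # if words not the sames -> False
--     if lst[left_index] != lst[right_index]:
--         return False
--
--     # if words not palindrome -> False
--     if not is_word_palindrome(lst[left_index]):
--         return False
--
--     return is_list_palindrome(lst,left_index +1, right_index-1)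
--
-- def is_word_palindrome(word, left = FIRST_INDEX, right = None):
--     # Initialize right index on first call only
--     if right is None:
--         right = len(word) -1
--
--     # if word empty
--     if not word:
--         return True
--
--     # if pointers points the same char (middle char) -> True
--     if right == left:
--         return True
--
--     # if left pointer > right pointer -> True
--     if left > right:
--         return True
--
--     # if chars not equal -> False
--     if word[left] != word[right]:
--         return False
--
--     # right ptr > left ptr  -> move to the next chars
--     return is_word_palindrome(word, left +1, right -1)
-- ===== SOURCE B (Python) =====
-- FIRST_INDEX = 0
--
-- def is_list_palindrome(lst, left_index=FIRST_INDEX, right_index=None):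
--     if right_index is None:
--         right_index = len(lst) - 1
--     while left_index <= right_index:
--         w = lst[left_index]
--         if w != lst[right_index] or w != w[::-1]:
--             return False
--         left_index += 1
--         right_index -= 1
--     return True
-- ===== Notes on version B (the rewrite author's own statement) =====
-- stated objective: idiomatic
-- what changed: Replaces the two mutually-independent tail recursions by a single iterative two-pointer while loop, and the per-word recursive character check by the idiomatic reversed-slice comparison w == w[::-1].
import Mathlib
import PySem

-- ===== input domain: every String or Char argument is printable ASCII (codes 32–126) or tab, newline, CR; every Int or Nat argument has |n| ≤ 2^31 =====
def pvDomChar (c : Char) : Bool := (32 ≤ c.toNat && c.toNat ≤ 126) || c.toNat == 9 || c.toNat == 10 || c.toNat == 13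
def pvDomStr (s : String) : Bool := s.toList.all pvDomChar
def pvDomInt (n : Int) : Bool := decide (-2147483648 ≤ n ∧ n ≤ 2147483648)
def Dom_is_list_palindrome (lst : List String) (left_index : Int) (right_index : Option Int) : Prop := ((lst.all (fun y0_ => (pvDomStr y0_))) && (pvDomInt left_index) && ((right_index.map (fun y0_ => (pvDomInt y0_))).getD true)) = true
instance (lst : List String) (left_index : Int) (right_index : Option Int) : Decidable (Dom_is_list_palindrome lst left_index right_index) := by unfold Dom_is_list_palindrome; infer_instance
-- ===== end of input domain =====

-- B replaces A's two tail recursions by an iterative two-pointer loop with a reversed-slice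
-- word check (objective: idiomatic); same return value wherever A returns normally.

-- ===== PORT A =====
-- inner recursion of Python's is_word_palindrome (its self-call always passes right as an int)
def pvWordGo (word : List Char) (left right : Int) : Bool :=
  if word = [] then true
  else if right == left then true
  else if left > right then true
  else if PySem.List.pyGet? word left ≠ PySem.List.pyGet? word right then false
  else pvWordGo word (left + 1) (right - 1)
termination_by (right - left + 1).toNat
decreasing_by omega

def is_word_palindrome (word : String) (left : Int) (right : Option Int) : Bool :=
  -- "if right is None: right = len(word) - 1"
  pvWordGo word.toList left (right.getD ((word.toList.length : Int) - 1))

-- inner recursion of Python's is_list_palindrome; on an index out of range Python raises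
-- IndexError (pyGet? = none, excluded by Pre_) and the port returns false.
def pvListGoA (lst : List String) (left right : Int) : Bool :=
  if left > right then true
  else
    match PySem.List.pyGet? lst left, PySem.List.pyGet? lst right with
    | some wl, some wr =>
      if wl ≠ wr then false
      else if ¬ is_word_palindrome wl 0 none then false
      else pvListGoA lst (left + 1) (right - 1)
    | _, _ => false
termination_by (right - left + 1).toNat
decreasing_by omega

def is_list_palindrome (lst : List String) (left_index : Int) (right_index : Option Int) : Bool :=
  pvListGoA lst left_index (right_index.getD ((lst.length : Int) - 1))

-- ===== PORT B =====
-- the while loop of Source B; out-of-range access (Python IndexError, outside Pre_) gives false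
def pvListGoB (lst : List String) (l r : Int) : Bool :=
  if l ≤ r then
    match PySem.List.pyGet? lst l, PySem.List.pyGet? lst r with
    | some w, some w' =>
      if w ≠ w' || w ≠ String.ofList w.toList.reverse then false   -- w != w[::-1]
      else pvListGoB lst (l + 1) (r - 1)
    | _, _ => false
  else true
termination_by (r - l + 1).toNat
decreasing_by omega

def is_list_palindrome_alt (lst : List String) (left_index : Int) (right_index : Option Int) : Bool :=
  pvListGoB lst left_index (right_index.getD ((lst.length : Int) - 1))

-- ===== PRECONDITION & SPEC =====
-- Pre_ excludes exactly the inputs on which Python A raises IndexError: a comparison step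
-- runs (left ≤ effective right) while a pointer starts outside [-len, len-1].
def Pre_is_list_palindrome (lst : List String) (left_index : Int) (right_index : Option Int) : Prop :=
  left_index ≤ right_index.getD ((lst.length : Int) - 1) →
    (-(lst.length : Int) ≤ left_index ∧ right_index.getD ((lst.length : Int) - 1) < (lst.length : Int))
instance (lst : List String) (left_index : Int) (right_index : Option Int) : Decidable (Pre_is_list_palindrome lst left_index right_index) := by unfold Pre_is_list_palindrome; infer_instance

def pvWitness_is_list_palindrome : List String × Int × Option Int := (["aba", "x x", "aba"], 0, none)

def Spec_is_list_palindrome (lst : List String) (left_index : Int) (right_index : Option Int) (out : Bool) : Prop := out = is_list_palindrome_alt lst left_index right_index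
instance (lst : List String) (left_index : Int) (right_index : Option Int) (out : Bool) : Decidable (Spec_is_list_palindrome lst left_index right_index out) := by unfold Spec_is_list_palindrome; infer_instance

-- ===== CLAIM (what is proved, stated in full; the proofs are below) =====
def Claim_equal_is_list_palindrome : Prop := ∀ (lst : List String) (left_index : Int) (right_index : Option Int), Dom_is_list_palindrome lst left_index right_index → Pre_is_list_palindrome lst left_index right_index → Spec_is_list_palindrome lst left_index right_index (is_list_palindrome lst left_index right_index)

-- ===== LEMMAS AND PROOFS =====

-- characterisation of A's two-pointer word recursion by symmetric index pairs
theorem pvWordGo_iff (cs : List Char) (l r : Int) : 0 ≤ l → r < (cs.length : Int) →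
    (pvWordGo cs l r = true ↔
      ∀ i : Int, l ≤ i → i ≤ r → PySem.List.pyGet? cs i = PySem.List.pyGet? cs (l + r - i)) := by
  refine pvWordGo.induct cs
    (fun l r => 0 ≤ l → r < (cs.length : Int) →
      (pvWordGo cs l r = true ↔
        ∀ i : Int, l ≤ i → i ≤ r → PySem.List.pyGet? cs i = PySem.List.pyGet? cs (l + r - i)))
    ?_ ?_ ?_ ?_ ?_ l r
  · intro l r h hl hr
    subst h
    rw [pvWordGo, if_pos rfl]
    simp only [List.length_nil, Nat.cast_zero] at hr
    constructor
    · intro _ i hi hir; exfalso; omega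
    · intro _; rfl
  · intro l r h1 h2 hl hr
    have h2' : r = l := by simpa using h2
    rw [pvWordGo, if_neg h1, if_pos h2]
    constructor
    · intro _ i hi hir
      have e : l + r - i = i := by omega
      rw [e]
    · intro _; rfl
  · intro l r h1 h2 h3 hl hr
    rw [pvWordGo, if_neg h1, if_neg h2, if_pos h3]
    constructor
    · intro _ i hi hir; exfalso; omega
    · intro _; rfl
  · intro l r h1 h2 h3 h4 hl hr
    rw [pvWordGo, if_neg h1, if_neg h2, if_neg h3, if_pos h4]
    constructor
    · intro h; simp at h
    · intro hall
      exfalso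
      have hx := hall l (le_refl l) (by omega)
      have e : l + r - l = r := by omega
      rw [e] at hx
      exact h4 hx
  · intro l r h1 h2 h3 h4 ih hl hr
    rw [pvWordGo, if_neg h1, if_neg h2, if_neg h3, if_neg h4]
    simp only [ne_eq, not_not] at h4
    have h2' : r ≠ l := by simpa using h2
    rw [ih (by omega) (by omega)]
    constructor
    · intro hrec i hi hir
      by_cases hil : i = l
      · subst hil
        have e : i + r - i = r := by omega
        rw [e]; exact h4
      · by_cases hirr : i = r
        · subst hirr
          have e : l + i - i = l := by omega
          rw [e]; exact h4.symm
        · have hx := hrec i (by omega) (by omega)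
          have e : l + 1 + (r - 1) - i = l + r - i := by omega
          rwa [e] at hx
    · intro hall i hi hir
      have hx := hall i (by omega) (by omega)
      have e : l + 1 + (r - 1) - i = l + r - i := by omega
      rw [e]; exact hx

-- pointwise symmetric pairs on [0, n-1] is exactly "the list equals its reverse"
theorem palin_pointwise_iff (cs : List Char) :
    (∀ i : Int, 0 ≤ i → i ≤ (cs.length : Int) - 1 →
        PySem.List.pyGet? cs i = PySem.List.pyGet? cs (0 + ((cs.length : Int) - 1) - i)) ↔
      cs = cs.reverse := by
  constructor
  · intro hall
    apply List.ext_getElem?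
    intro n
    by_cases hn : n < cs.length
    · have h := hall n (by omega) (by omega)
      rw [PySem.List.pyGet?_of_nonneg cs (by omega), PySem.List.pyGet?_of_nonneg cs (by omega)] at h
      rw [List.getElem?_reverse hn]
      have e1 : ((n : Int)).toNat = n := by omega
      have e2 : (0 + ((cs.length : Int) - 1) - (n : Int)).toNat = cs.length - 1 - n := by omega
      rw [e1, e2] at h
      exact h
    · have hrn : cs.reverse.length ≤ n := by simpa using Nat.le_of_not_lt hn
      rw [List.getElem?_eq_none (by omega), List.getElem?_eq_none hrn]
  · intro hrev i hi hir
    have hlen : i.toNat < cs.length := by omega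
    rw [PySem.List.pyGet?_of_nonneg cs hi, PySem.List.pyGet?_of_nonneg cs (by omega)]
    have e2 : (0 + ((cs.length : Int) - 1) - i).toNat = cs.length - 1 - i.toNat := by omega
    rw [e2]
    conv_lhs => rw [hrev]
    rw [List.getElem?_reverse hlen]

-- A's word check agrees with B's reversed-slice comparison
theorem word_eq_rev (w : String) :
    is_word_palindrome w 0 none = (w == String.ofList w.toList.reverse) := by
  unfold is_word_palindrome
  simp only [Option.getD_none]
  have key : w = String.ofList w.toList.reverse ↔ w.toList = w.toList.reverse := by
    constructor
    · intro h
      conv_lhs => rw [h]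
      simp
    · intro h
      conv_lhs => rw [← String.ofList_toList (s := w)]
      exact congrArg String.ofList h
  rw [Bool.eq_iff_iff, beq_iff_eq,
      pvWordGo_iff w.toList 0 ((w.toList.length : Int) - 1) (le_refl 0) (by omega),
      palin_pointwise_iff w.toList]
  exact key.symm

-- the two list-level recursions coincide
theorem listGo_eq (lst : List String) (l r : Int) : pvListGoA lst l r = pvListGoB lst l r := by
  refine pvListGoA.induct lst (fun l r => pvListGoA lst l r = pvListGoB lst l r) ?_ ?_ ?_ ?_ ?_ l r
  · intro l r h
    rw [pvListGoA, pvListGoB, if_pos h, if_neg (by omega)]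
  · intro l r h wl wr hwr hwl hne
    rw [pvListGoA, pvListGoB, if_neg h, if_pos (by omega)]
    simp only [hwl, hwr]
    rw [if_pos hne, if_pos (by simp [hne])]
  · intro l r h wl wr hwr hwl hne hpal
    rw [pvListGoA, pvListGoB, if_neg h, if_pos (by omega)]
    simp only [hwl, hwr]
    rw [if_neg hne, if_pos hpal]
    have hq : wl ≠ String.ofList wl.toList.reverse := by
      intro hcontra
      apply hpal
      rw [word_eq_rev]
      simp [← hcontra]
    rw [if_pos (by simp [hq])]
  · intro l r h wl wr hwr hwl hne hpal ih
    rw [pvListGoA, pvListGoB, if_neg h, if_pos (by omega)]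
    simp only [hwl, hwr]
    rw [if_neg hne, if_neg hpal]
    have hwlwr : wl = wr := not_not.mp (by simpa using hne)
    have hq : wl = String.ofList wl.toList.reverse := by
      have hp := not_not.mp hpal
      rw [word_eq_rev] at hp
      exact eq_of_beq hp
    rw [if_neg (by
      simp only [Bool.or_eq_true, decide_eq_true_eq, not_or]
      exact ⟨fun hc => hc hwlwr, fun hc => hc hq⟩)]
    exact ih
  · intro l r h hfalse
    rw [pvListGoA, pvListGoB, if_neg h, if_pos (by omega)]
    cases e1 : PySem.List.pyGet? lst l with
    | none =>
      cases e2 : PySem.List.pyGet? lst r <;> rfl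
    | some w =>
      cases e2 : PySem.List.pyGet? lst r with
      | none => rfl
      | some w' => exact (hfalse w w' e1 e2).elim

-- ===== VERDICT (by name: the statement is the Claim_ definition above) =====
theorem is_list_palindrome_spec : Claim_equal_is_list_palindrome := by
  intro lst l r _ _
  unfold Spec_is_list_palindrome is_list_palindrome is_list_palindrome_alt
  exact listGo_eq lst l (r.getD ((lst.length : Int) - 1))
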